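-- pv_equiv track=rewrite | github.com/sanjayr93/ms-prefixspan | code/sramac22-ms-ps.py | addAndRemove
-- ===== SOURCE A (Python) =====
-- def addAndRemove(add: list, remove, target):
--     # for the set operation A U B - C on a list
--     ind = len(target)
--     try:
--         ind = target.index(remove)
--         target.pop(ind)
--     except ValueError:
--         pass
--     finally:
--         for i in add:
--             target.insert(ind, i)
--             ind += 1
--     return target
-- ===== SOURCE B (Python) =====
-- def addAndRemove(add: list, remove, target):
--     # Single forward pass: replace the first occurrence of `remove` by the
--     # whole of `add`; if never found, append `add` at the end.
--     result = []
--     replaced = False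
--     for x in target:
--         if not replaced and x == remove:
--             result.extend(add)
--             replaced = True
--         else:
--             result.append(x)
--     if not replaced:
--         result.extend(add)
--     target[:] = result  # mutate in place, like A
--     return target
-- ===== Notes on version B (the rewrite author's own statement) =====
-- stated objective: alternative
-- what changed: Replaces index/pop/repeated-insert try/finally control flow by one forward pass with a 'replaced' flag that splices add at the first match or appends it at the end, then writes the result back in place.
import Mathlib
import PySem

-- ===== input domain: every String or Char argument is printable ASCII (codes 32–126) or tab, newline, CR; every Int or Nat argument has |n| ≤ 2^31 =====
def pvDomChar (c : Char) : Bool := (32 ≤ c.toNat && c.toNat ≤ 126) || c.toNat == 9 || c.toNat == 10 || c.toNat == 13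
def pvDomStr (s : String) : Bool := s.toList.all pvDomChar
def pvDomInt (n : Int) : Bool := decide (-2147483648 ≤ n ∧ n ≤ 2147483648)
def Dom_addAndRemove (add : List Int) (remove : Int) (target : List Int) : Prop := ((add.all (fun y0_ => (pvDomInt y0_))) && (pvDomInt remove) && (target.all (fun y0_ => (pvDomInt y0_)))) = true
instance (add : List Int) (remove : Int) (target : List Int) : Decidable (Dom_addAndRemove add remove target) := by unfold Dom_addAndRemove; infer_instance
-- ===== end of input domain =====

-- B replaces A's index/pop/repeated-insert with one forward pass that splices
-- `add` at the first occurrence of `remove` (or appends it); return value only: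
-- both Pythons mutate `target` in place identically (B via target[:] = result).

-- ===== PORT A =====
-- the `finally` loop: for i in add: target.insert(ind, i); ind += 1
def addAndRemoveIns (add : List Int) (st : List Int × Int) : List Int × Int :=
  add.foldl (fun s i => (PySem.List.insert s.1 s.2 i, s.2 + 1)) st

def addAndRemove (add : List Int) (remove : Int) (target : List Int) : List Int :=
  match PySem.List.index? target remove with
  | none =>
      -- ValueError: ind stays len(target), nothing popped
      (addAndRemoveIns add (target, (target.length : Int))).1
  | some ind =>
      match PySem.List.pop? target (ind : Int) with
      | some (_, t) => (addAndRemoveIns add (t, (ind : Int))).1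
      | none => target  -- unreachable: pop at a found index never raises

-- ===== PORT B =====
-- loop body of Source B: extend with add at the first match, else append x
def altStep (add : List Int) (remove : Int) (s : List Int × Bool) (x : Int) : List Int × Bool :=
  if s.2 = false ∧ x = remove then (s.1 ++ add, true) else (s.1 ++ [x], s.2)

def addAndRemove_alt (add : List Int) (remove : Int) (target : List Int) : List Int :=
  let r := target.foldl (altStep add remove) ([], false)
  if r.2 = true then r.1 else r.1 ++ add

-- ===== PRECONDITION & SPEC =====
def Spec_addAndRemove (add : List Int) (remove : Int) (target : List Int) (out : List Int) : Prop := out = addAndRemove_alt add remove target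
instance (add : List Int) (remove : Int) (target : List Int) (out : List Int) : Decidable (Spec_addAndRemove add remove target out) := by unfold Spec_addAndRemove; infer_instance

-- ===== CLAIM (what is proved, stated in full; the proofs are below) =====
def Claim_equal_addAndRemove : Prop := ∀ (add : List Int) (remove : Int) (target : List Int), Dom_addAndRemove add remove target → Spec_addAndRemove add remove target (addAndRemove add remove target)

-- ===== LEMMAS AND PROOFS =====

-- common reference function: splice `add` at the first occurrence of `remove`
def arSpec (add : List Int) (remove : Int) : List Int → List Int
  | [] => add
  | x :: xs => if x = remove then add ++ xs else x :: arSpec add remove xs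

-- A's insertion loop at a valid position p inserts `add` there en bloc
theorem ins_eq (add : List Int) (t : List Int) (p : Nat) (hp : p ≤ t.length) :
    (addAndRemoveIns add (t, (p : Int))).1 = t.take p ++ add ++ t.drop p := by
  induction add generalizing t p with
  | nil => simp [addAndRemoveIns, List.take_append_drop]
  | cons i add ih =>
      rw [addAndRemoveIns, List.foldl_cons]
      have h1 : PySem.List.insert t (p : Int) i = t.take p ++ i :: t.drop p :=
        PySem.List.insert_natCast t p i hp
      have h2 : ((p : Int) + 1) = ((p + 1 : Nat) : Int) := by push_cast; ring
      rw [h1, h2]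
      have hlen : p + 1 ≤ (t.take p ++ i :: t.drop p).length := by
        simp; omega
      have := ih (t.take p ++ i :: t.drop p) (p + 1) hlen
      rw [addAndRemoveIns] at this
      rw [this]
      have hptake : (t.take p).length = p := by rw [List.length_take]; omega
      rw [List.take_append, List.drop_append, hptake]
      rw [List.take_of_length_le (l := List.take p t) (i := p + 1) (by rw [hptake]; omega),
          List.drop_eq_nil_of_le (as := List.take p t) (i := p + 1) (by rw [hptake]; omega)]
      simp

theorem arSpec_not_mem (add : List Int) (remove : Int) (t : List Int)
    (h : remove ∉ t) : arSpec add remove t = t ++ add := by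
  induction t with
  | nil => simp [arSpec]
  | cons x xs ih =>
      simp only [List.mem_cons, not_or] at h
      simp [arSpec, Ne.symm h.1, ih h.2]

theorem arSpec_found (add : List Int) (remove : Int) (pre suf : List Int)
    (h : remove ∉ pre) : arSpec add remove (pre ++ remove :: suf) = pre ++ add ++ suf := by
  induction pre with
  | nil => simp [arSpec]
  | cons x xs ih =>
      simp only [List.mem_cons, not_or] at h
      simp [arSpec, Ne.symm h.1, ih h.2]

theorem a_eq_spec (add : List Int) (remove : Int) (target : List Int) :
    addAndRemove add remove target = arSpec add remove target := by
  cases hidx : PySem.List.index? target remove with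
  | none =>
      have hnm : remove ∉ target := (PySem.List.index?_eq_none_iff _ _).1 hidx
      simp only [addAndRemove, hidx]
      rw [ins_eq add target target.length (le_refl _)]
      simp [arSpec_not_mem add remove target hnm]
  | some ind =>
      obtain ⟨pre, suf, heq, hlen, hnm⟩ := (PySem.List.index?_eq_some_iff _ _ _).1 hidx
      have hlt : ind < target.length := by
        subst heq; simp only [List.length_append, List.length_cons]; omega
      simp only [addAndRemove, hidx]
      rw [PySem.List.pop?_natCast target ind hlt]
      have herase : target.eraseIdx ind = pre ++ suf := by
        subst heq hlen
        rw [List.eraseIdx_append_of_length_le (le_refl _)]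
        simp
      have hple : ind ≤ (pre ++ suf).length := by
        subst hlen; simp [List.length_append]
      show (addAndRemoveIns add (target.eraseIdx ind, (ind : Int))).1 = arSpec add remove target
      rw [herase, ins_eq add (pre ++ suf) ind hple]
      subst heq hlen
      rw [List.take_append, List.drop_append]
      simp [arSpec_found add remove pre suf hnm]

-- once replaced, B just copies the rest
theorem altStep_true (add : List Int) (remove : Int) (acc : List Int) (x : Int) :
    altStep add remove (acc, true) x = (acc ++ [x], true) := by
  simp [altStep]

theorem altStep_false_eq (add : List Int) (remove : Int) (acc : List Int) (x : Int)
    (hx : x = remove) : altStep add remove (acc, false) x = (acc ++ add, true) := by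
  simp [altStep, hx]

theorem altStep_false_ne (add : List Int) (remove : Int) (acc : List Int) (x : Int)
    (hx : x ≠ remove) : altStep add remove (acc, false) x = (acc ++ [x], false) := by
  simp [altStep, hx]

theorem b_loop_true (add : List Int) (remove : Int) (t acc : List Int) :
    t.foldl (altStep add remove) (acc, true) = (acc ++ t, true) := by
  induction t generalizing acc with
  | nil => simp
  | cons x xs ih => rw [List.foldl_cons, altStep_true, ih]; simp

theorem b_eq_spec_aux (add : List Int) (remove : Int) (t acc : List Int) :
    (let r := t.foldl (altStep add remove) (acc, false)
     if r.2 = true then r.1 else r.1 ++ add) = acc ++ arSpec add remove t := by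
  induction t generalizing acc with
  | nil => simp [arSpec]
  | cons x xs ih =>
      by_cases hx : x = remove
      · simp only [List.foldl_cons, altStep_false_eq add remove acc x hx, b_loop_true]
        simp [arSpec, hx]
      · simp only [List.foldl_cons, altStep_false_ne add remove acc x hx]
        have := ih (acc ++ [x])
        simp only at this
        simp only [this]
        simp [arSpec, hx]

theorem b_eq_spec (add : List Int) (remove : Int) (target : List Int) :
    addAndRemove_alt add remove target = arSpec add remove target := by
  have := b_eq_spec_aux add remove target []
  simpa [addAndRemove_alt] using this

-- ===== VERDICT (by name: the statement is the Claim_ definition above) =====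
theorem addAndRemove_spec : Claim_equal_addAndRemove := by
  intro add remove target _
  unfold Spec_addAndRemove
  rw [a_eq_spec, b_eq_spec]
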